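-- pv_equiv track=rewrite | github.com/Jlestat/codewars | Row Weights.py | row_weights
-- ===== SOURCE A (Python) =====
-- def row_weights(array):
--     first_team = 0
--     second_team = 0
--     for i in range(len(array)):
--         if (i + 1) % 2 == 0:
--             second_team += array[i]
--         else:
--             first_team += array[i]
--     return (first_team, second_team)
-- ===== SOURCE B (Python) =====
-- def row_weights(array):
--     first = 0
--     second = 0
--     i = 0
--     n = len(array)
--     while i + 1 < n:
--         first += array[i]
--         second += array[i + 1]
--         i += 2
--     if i < n:
--         first += array[i]
--     return (first, second)
-- ===== Notes on version B (the rewrite author's own statement) =====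
-- stated objective: alternative
-- what changed: Replaced the index loop that branches on (i+1) % 2 with a loop that consumes the list two elements at a time, adding one element to each accumulator per step and handling a trailing odd element separately, with no parity test.
import Mathlib
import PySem

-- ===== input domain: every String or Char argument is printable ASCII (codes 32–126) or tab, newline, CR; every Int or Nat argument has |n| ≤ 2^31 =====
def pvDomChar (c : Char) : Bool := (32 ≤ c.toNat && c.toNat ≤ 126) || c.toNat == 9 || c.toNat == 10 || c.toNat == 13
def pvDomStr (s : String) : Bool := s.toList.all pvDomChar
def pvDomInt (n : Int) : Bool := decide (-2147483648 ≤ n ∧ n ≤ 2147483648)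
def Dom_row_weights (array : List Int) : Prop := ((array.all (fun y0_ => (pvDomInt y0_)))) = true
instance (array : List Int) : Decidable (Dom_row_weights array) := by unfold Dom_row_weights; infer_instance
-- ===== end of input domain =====

-- B replaces the index loop branching on (i+1) % 2 with a loop consuming two elements per step (trailing odd element handled after the loop) — alternative decomposition, same cost.

-- ===== PORT A =====
def row_weights (array : List Int) : Int × Int :=
  (PySem.List.pyRange 0 (PySem.List.len array) 1).foldl
    (fun (st : Int × Int) i =>
      if PySem.Int.mod (i + 1) 2 == 0 then (st.1, st.2 + PySem.List.pyGetD array i 0)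
      else (st.1 + PySem.List.pyGetD array i 0, st.2))
    (0, 0)

-- ===== PORT B =====
-- the while loop 'while i + 1 < n' over array[i:], two elements per step; the final
-- 'if i < n' is the one-element case
def rwLoop : List Int → Int → Int → Int × Int
  | a :: b :: rest, first, second => rwLoop rest (first + a) (second + b)
  | [a], first, second => (first + a, second)
  | [], first, second => (first, second)

def row_weights_alt (array : List Int) : Int × Int := rwLoop array 0 0

-- ===== PRECONDITION & SPEC =====
def Spec_row_weights (array : List Int) (out : Int × Int) : Prop := out = row_weights_alt array
instance (array : List Int) (out : Int × Int) : Decidable (Spec_row_weights array out) := by unfold Spec_row_weights; infer_instance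

-- ===== CLAIM =====
def Claim_equal_row_weights : Prop := ∀ (array : List Int), Dom_row_weights array → Spec_row_weights array (row_weights array)

-- ===== LEMMAS AND PROOFS =====

def pvStep (st : Int × Int) (p : Int × Int) : Int × Int :=
  if PySem.Int.mod (p.1 + 1) 2 == 0 then (st.1, st.2 + p.2)
  else (st.1 + p.2, st.2)

lemma pvStep_even (k : Int) (hk : k % 2 = 0) (st : Int × Int) (x : Int) :
    pvStep st (k, x) = (st.1 + x, st.2) := by
  simp only [pvStep, PySem.Int.mod]
  have h : (k + 1).fmod 2 = 1 := by rw [Int.fmod_eq_emod]; omega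
  simp [h]

lemma pvStep_odd (k : Int) (hk : k % 2 = 1) (st : Int × Int) (x : Int) :
    pvStep st (k, x) = (st.1, st.2 + x) := by
  simp only [pvStep, PySem.Int.mod]
  have h : (k + 1).fmod 2 = 0 := by rw [Int.fmod_eq_emod]; omega
  simp [h]

lemma pvFold_enum (xs : List Int) (f s : Int) : ∀ (k : Nat),
    (PySem.List.enumerate xs (2 * (k : Int))).foldl pvStep (f, s) = rwLoop xs f s := by
  induction xs, f, s using rwLoop.induct with
  | case3 f s => intro k; simp [PySem.List.enumerate, rwLoop]
  | case2 a f s =>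
    intro k
    rw [PySem.List.enumerate_cons]
    simp only [PySem.List.enumerate, List.foldl]
    rw [pvStep_even (2 * (k : Int)) (by omega)]
    simp [rwLoop]
  | case1 a b rest f s ih =>
    intro k
    rw [PySem.List.enumerate_cons, PySem.List.enumerate_cons]
    simp only [List.foldl]
    rw [pvStep_even (2 * (k : Int)) (by omega), pvStep_odd (2 * (k : Int) + 1) (by omega)]
    have h2 : (2 * (k : Int) + 1 + 1) = 2 * ((k + 1 : Nat) : Int) := by push_cast; ring
    rw [h2, ih (k + 1), rwLoop]

-- ===== VERDICT =====
theorem row_weights_spec : Claim_equal_row_weights := by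
  intro array _
  unfold Spec_row_weights row_weights row_weights_alt
  have henum := PySem.List.enumerate_eq_map_pyRange array (0 : Int)
  calc (PySem.List.pyRange 0 (PySem.List.len array) 1).foldl
        (fun (st : Int × Int) i =>
          if PySem.Int.mod (i + 1) 2 == 0 then (st.1, st.2 + PySem.List.pyGetD array i 0)
          else (st.1 + PySem.List.pyGetD array i 0, st.2)) (0, 0)
      = ((PySem.List.pyRange 0 (PySem.List.len array) 1).map
          (fun j => (j, PySem.List.pyGetD array j 0))).foldl pvStep (0, 0) := by
        rw [List.foldl_map]; rfl
    _ = (PySem.List.enumerate array (2 * ((0 : Nat) : Int))).foldl pvStep (0, 0) := by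
        simp only [PySem.List.len_eq] at henum
        norm_num; rw [← henum]
    _ = rwLoop array 0 0 := by rw [pvFold_enum array 0 0 0]
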